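-- pv_equiv track=rewrite | github.com/otelcos/evals | src/evals/cli/preflight/find_k.py | _extract_last_error_line
-- ===== SOURCE A (Python) =====
-- def _extract_last_error_line(output: str) -> str:
--     """Extract the last non-empty line from output as error message.
--
--     Args:
--         output: Command output string
--
--     Returns:
--         Last non-empty line, or default error message if none found
--     """
--     default_error = "Find-K evaluation failed"
--
--     if not output:
--         return default_error
--
--     lines = [line for line in output.strip().split("\n") if line.strip()]
--     if not lines:
--         return default_error
--
--     return lines[-1]
-- ===== SOURCE B (Python) =====
-- def _extract_last_error_line(output: str) -> str:
--     for line in reversed(output.strip().split("\n")):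
--         if line.strip():
--             return line
--     return "Find-K evaluation failed"
-- ===== Notes on version B (the rewrite author's own statement) =====
-- stated objective: simpler
-- what changed: B scans the split lines from the end and returns the first non-empty one (early exit), instead of materializing the whole filtered list and indexing its last element; the empty-output guard disappears because it falls through to the default naturally.
import Mathlib
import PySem

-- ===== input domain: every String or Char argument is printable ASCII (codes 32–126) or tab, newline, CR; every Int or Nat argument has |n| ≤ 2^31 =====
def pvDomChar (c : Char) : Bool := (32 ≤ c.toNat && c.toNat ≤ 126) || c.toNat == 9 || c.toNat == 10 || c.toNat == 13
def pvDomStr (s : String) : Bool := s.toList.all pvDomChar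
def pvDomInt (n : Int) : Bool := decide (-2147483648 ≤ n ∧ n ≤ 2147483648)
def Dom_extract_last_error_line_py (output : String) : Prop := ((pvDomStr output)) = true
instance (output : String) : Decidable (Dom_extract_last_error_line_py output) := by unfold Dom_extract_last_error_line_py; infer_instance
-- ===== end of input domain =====

-- B returns the same value by a different decomposition: a reversed scan with early exit
-- instead of building the filtered list and taking its last element.

-- ===== PORT A =====
def extract_last_error_line_py (output : String) : String :=
  let default_error := "Find-K evaluation failed"
  if output = "" then default_error
  else
    -- .split("\n"): split? is none only for sep = "", so .getD [] is exact here
    let lines := (((PySem.Str.split? (PySem.Str.strip output) "\n").getD [])).filter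
      (fun line => PySem.Str.strip line != "")
    if lines = [] then default_error
    else (PySem.List.pyGet? lines (-1)).getD default_error  -- lines[-1]; guarded non-empty

-- ===== PORT B =====
def extract_last_error_line_py_alt_loop : List String → String
  | [] => "Find-K evaluation failed"
  | line :: rest =>
    if PySem.Str.strip line != "" then line
    else extract_last_error_line_py_alt_loop rest

def extract_last_error_line_py_alt (output : String) : String :=
  extract_last_error_line_py_alt_loop
    ((((PySem.Str.split? (PySem.Str.strip output) "\n").getD [])).reverse)

-- ===== PRECONDITION & SPEC =====
def Spec_extract_last_error_line_py (output : String) (out : String) : Prop := out = extract_last_error_line_py_alt output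
instance (output : String) (out : String) : Decidable (Spec_extract_last_error_line_py output out) := by unfold Spec_extract_last_error_line_py; infer_instance

-- ===== CLAIM (what is proved, stated in full; the proofs are below) =====
def Claim_equal_extract_last_error_line_py : Prop := ∀ (output : String), Dom_extract_last_error_line_py output → Spec_extract_last_error_line_py output (extract_last_error_line_py output)

-- ===== LEMMAS AND PROOFS =====

-- B's loop returns the first element passing the filter, default if none.
theorem altLoop_eq_head (r : List String) :
    extract_last_error_line_py_alt_loop r
      = ((r.filter (fun line => PySem.Str.strip line != "")).head?).getD
          "Find-K evaluation failed" := by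
  induction r with
  | nil => rfl
  | cons l rest ih =>
    by_cases h : PySem.Str.strip l != ""
    · simp [extract_last_error_line_py_alt_loop, h]
    · simp [extract_last_error_line_py_alt_loop, h, ih]

-- ===== VERDICT (by name: the statement is the Claim_ definition above) =====
theorem extract_last_error_line_py_spec : Claim_equal_extract_last_error_line_py := by
  intro output _
  unfold Spec_extract_last_error_line_py extract_last_error_line_py extract_last_error_line_py_alt
  rw [altLoop_eq_head, List.filter_reverse, List.head?_reverse]
  by_cases h0 : output = ""
  · subst h0; decide
  · simp only [if_neg h0]
    set lines := (((PySem.Str.split? (PySem.Str.strip output) "\n").getD [])).filter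
      (fun line => PySem.Str.strip line != "") with hl
    by_cases hnil : lines = []
    · simp [hnil]
    · rw [if_neg hnil, PySem.List.pyGet?_neg_one]
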